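-- pv_equiv track=rewrite | github.com/apiaryio/black-belt | blackbelt/dependencies.py | separate_top_level_details
-- ===== SOURCE A (Python) =====
-- def separate_top_level_details(licenses, dep_name):
--     dep_details = None
--     fourth_party_licenses = []
--
--     for details in licenses:
--         if details['name'] == dep_name:
--             dep_details = details
--         else:
--             fourth_party_licenses.append(details)
--
--     return (dep_details, fourth_party_licenses)
-- ===== SOURCE B (Python) =====
-- def separate_top_level_details(licenses, dep_name):
--     # name -> details index: dict overwrite makes the last occurrence win
--     index = {d['name']: d for d in licenses}
--     fourth_party_licenses = [d for d in licenses if d['name'] != dep_name]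
--     return (index.get(dep_name), fourth_party_licenses)
-- ===== Notes on version B (the rewrite author's own statement) =====
-- stated objective: alternative
-- what changed: Builds a name->details hash index once (dict-comprehension, where overwrite semantics makes the last occurrence win) and answers dep_details by a single index.get lookup, plus an independent filter for the fourth-party list, instead of A's one loop threading a mutable dep_details/append accumulator.
import Mathlib
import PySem

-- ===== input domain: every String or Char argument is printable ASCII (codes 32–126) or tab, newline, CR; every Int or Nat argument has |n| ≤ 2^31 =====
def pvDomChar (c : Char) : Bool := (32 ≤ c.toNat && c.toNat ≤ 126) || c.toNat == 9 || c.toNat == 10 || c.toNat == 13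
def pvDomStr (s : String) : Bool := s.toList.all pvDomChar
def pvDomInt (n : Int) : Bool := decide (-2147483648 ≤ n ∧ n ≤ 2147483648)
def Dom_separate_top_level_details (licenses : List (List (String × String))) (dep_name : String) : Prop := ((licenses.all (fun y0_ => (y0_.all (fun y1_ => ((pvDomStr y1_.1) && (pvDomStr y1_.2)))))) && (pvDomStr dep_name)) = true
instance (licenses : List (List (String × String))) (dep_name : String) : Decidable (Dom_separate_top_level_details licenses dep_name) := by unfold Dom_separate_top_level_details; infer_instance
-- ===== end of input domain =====

-- B builds a name->details Dict once (insert-overwrite = last match wins) and looks dep_name up, plus an independent filter; return values only.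


-- ===== PORT A =====
-- d['name'] : first-match assoc-list lookup; default only reached outside Pre_ (Python raises KeyError there)
def pvName (d : List (String × String)) : String :=
  (((d.find? (fun kv => kv.1 == "name")).map Prod.snd).getD "")

def separate_top_level_details (licenses : List (List (String × String))) (dep_name : String) : (Option (List (String × String))) × (List (List (String × String))) :=
  licenses.foldl
    (fun st details =>
      if pvName details == dep_name then (some details, st.2)
      else (st.1, st.2 ++ [details]))
    (none, [])

-- ===== PORT B =====
def separate_top_level_details_alt (licenses : List (List (String × String))) (dep_name : String) : (Option (List (String × String))) × (List (List (String × String))) :=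
  let index := licenses.foldl (fun acc d => acc.insert (pvName d) d) PySem.Dict.empty
  let fourth_party_licenses := licenses.filter (fun d => !(pvName d == dep_name))
  (index.get? dep_name, fourth_party_licenses)

-- ===== PRECONDITION & SPEC =====
-- Pre_ excludes inputs on which Python A raises KeyError: some dict in licenses lacks the key "name".
def Pre_separate_top_level_details (licenses : List (List (String × String))) (dep_name : String) : Prop :=
  ∀ d ∈ licenses, (d.find? (fun kv => kv.1 == "name")).isSome
instance (licenses : List (List (String × String))) (dep_name : String) : Decidable (Pre_separate_top_level_details licenses dep_name) := by unfold Pre_separate_top_level_details; infer_instance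
def pvWitness_separate_top_level_details : (List (List (String × String))) × String :=
  ([[("name", "requests"), ("license", "MIT")], [("name", "six")]], "requests")

def Spec_separate_top_level_details (licenses : List (List (String × String))) (dep_name : String) (out : (Option (List (String × String))) × (List (List (String × String)))) : Prop := out = separate_top_level_details_alt licenses dep_name
instance (licenses : List (List (String × String))) (dep_name : String) (out : (Option (List (String × String))) × (List (List (String × String)))) : Decidable (Spec_separate_top_level_details licenses dep_name out) := by unfold Spec_separate_top_level_details; infer_instance

-- ===== CLAIM (what is proved, stated in full; the proofs are below) =====
def Claim_equal_separate_top_level_details : Prop := ∀ (licenses : List (List (String × String))) (dep_name : String), Dom_separate_top_level_details licenses dep_name → Pre_separate_top_level_details licenses dep_name → Spec_separate_top_level_details licenses dep_name (separate_top_level_details licenses dep_name)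

-- ===== LEMMAS AND PROOFS =====
lemma pvFoldA (p : List (String × String) → Bool) (l : List (List (String × String)))
    (d0 : Option (List (String × String))) (acc : List (List (String × String))) :
    l.foldl (fun st d => if p d then (some d, st.2) else (st.1, st.2 ++ [d])) (d0, acc)
    = ((l.reverse.find? p).or d0, acc ++ l.filter (fun d => !p d)) := by
  induction l generalizing d0 acc with
  | nil => simp
  | cons a t ih =>
    simp only [List.foldl_cons, List.reverse_cons, List.find?_append, List.filter_cons]
    cases h : p a <;> simp [ih, h]

lemma pvFoldB (k : String) (l : List (List (String × String)))
    (d0 : PySem.Dict String (List (String × String))) :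
    (l.foldl (fun acc d => acc.insert (pvName d) d) d0).get? k
    = (l.reverse.find? (fun d => pvName d == k)).or (d0.get? k) := by
  induction l generalizing d0 with
  | nil => simp
  | cons a t ih =>
    simp only [List.foldl_cons, List.reverse_cons, List.find?_append, ih]
    by_cases h : pvName a = k
    · subst h; simp [PySem.Dict.get?_insert_self]
    · rw [PySem.Dict.get?_insert_of_ne (hne := fun e => h (Eq.symm e))]
      have hb : (pvName a == k) = false := by simpa using h
      simp [List.find?, hb]

-- ===== VERDICT (by name: the statement is the Claim_ definition above) =====
theorem separate_top_level_details_spec : Claim_equal_separate_top_level_details := by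
  intro licenses dep_name _ _
  unfold Spec_separate_top_level_details separate_top_level_details separate_top_level_details_alt
  rw [pvFoldA]
  simp only [pvFoldB, Option.or_none, List.nil_append, PySem.Dict.get?_empty]
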